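-- pv_equiv track=rewrite | github.com/JGEnglishLab/ConSeqUMI | src/umi/umiBinningFunctions.py | pair_top_and_bottom_umi_by_matching_reads
-- ===== SOURCE A (Python) =====
-- def pair_top_and_bottom_umi_by_matching_reads(topUmiToReadIndices, bottomUmiToReadIndices):
--     topUmis = []
--     bottomUmis = []
--     matchingReadIndices = []
--     for topUmi, topReadIndices in topUmiToReadIndices.items():
--         for bottomUmi, bottomReadIndices in bottomUmiToReadIndices.items():
--             intersect = topReadIndices.intersection(bottomReadIndices)
--             if len(intersect) == 0: continue
--             topUmis.append(topUmi)
--             bottomUmis.append(bottomUmi)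
--             matchingReadIndices.append(intersect)
--
--     lengths = [len(x) for x in matchingReadIndices]
--     lengths, topUmis, bottomUmis, matchingReadIndices = zip(*sorted(zip(lengths, topUmis, bottomUmis, matchingReadIndices), reverse=True))
--     topUmis, bottomUmis, matchingReadIndices = [list(x) for x in [topUmis, bottomUmis, matchingReadIndices]]
--     return topUmis, bottomUmis, matchingReadIndices
-- ===== SOURCE B (Python) =====
-- def pair_top_and_bottom_umi_by_matching_reads(topUmiToReadIndices, bottomUmiToReadIndices):
--     readToBottomUmis = {}
--     for bottomUmi, readIndices in bottomUmiToReadIndices.items():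
--         for r in readIndices:
--             readToBottomUmis.setdefault(r, []).append(bottomUmi)
--     pairToReads = {}
--     for topUmi, readIndices in topUmiToReadIndices.items():
--         for r in readIndices:
--             for bottomUmi in readToBottomUmis.get(r, ()):
--                 pairToReads.setdefault((topUmi, bottomUmi), set()).add(r)
--     rows = sorted(pairToReads.items(), key=lambda kv: (len(kv[1]), kv[0][0], kv[0][1]), reverse=True)
--     topUmis = [t for (t, _), _ in rows]
--     bottomUmis = [b for (_, b), _ in rows]
--     matchingReadIndices = [s for _, s in rows]
--     return topUmis, bottomUmis, matchingReadIndices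
-- ===== Notes on version B (the rewrite author's own statement) =====
-- stated objective: faster
-- what changed: Instead of intersecting every top read-index set with every bottom one (T*B set intersections), B inverts the bottom map into a read->bottomUmis index and aggregates each top read into its (topUmi, bottomUmi) buckets in one pass over the reads, then sorts the buckets by (overlap, topUmi, bottomUmi) descending.
import Mathlib
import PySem

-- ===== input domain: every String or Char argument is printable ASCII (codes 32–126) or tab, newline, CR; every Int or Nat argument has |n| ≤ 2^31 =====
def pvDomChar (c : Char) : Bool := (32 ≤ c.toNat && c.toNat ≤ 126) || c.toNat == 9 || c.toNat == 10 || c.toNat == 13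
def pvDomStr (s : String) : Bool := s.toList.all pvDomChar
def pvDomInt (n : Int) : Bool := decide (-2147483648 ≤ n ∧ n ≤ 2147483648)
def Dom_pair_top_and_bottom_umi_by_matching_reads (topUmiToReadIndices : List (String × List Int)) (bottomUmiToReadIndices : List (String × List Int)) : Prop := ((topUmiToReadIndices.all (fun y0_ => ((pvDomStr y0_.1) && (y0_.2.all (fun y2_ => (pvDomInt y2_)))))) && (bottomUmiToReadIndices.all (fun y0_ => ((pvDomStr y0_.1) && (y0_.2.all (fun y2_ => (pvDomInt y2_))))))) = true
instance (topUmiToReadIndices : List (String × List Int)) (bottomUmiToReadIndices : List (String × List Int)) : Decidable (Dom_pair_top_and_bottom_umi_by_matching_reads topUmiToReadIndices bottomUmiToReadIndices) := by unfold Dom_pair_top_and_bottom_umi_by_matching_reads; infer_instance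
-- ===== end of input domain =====

-- B inverts the bottom read-index sets into a read→bottom-UMI map and aggregates pairs in one pass
-- over the top reads (objective: faster — no top×bottom scan of full sets); same return value.

-- shared input conversion: the Python arguments are dict[str, set[int]]; under the type convention
-- they arrive as assoc lists, so both ports first rebuild the dict of sets exactly as the caller holds it.
def pvAsDict (l : List (String × List Int)) : PySem.Dict String (List Int) :=
  PySem.Dict.ofList (l.map (fun p => (p.1, PySem.Set.ofList p.2)))

-- ===== PORT A =====
def pair_top_and_bottom_umi_by_matching_reads (topUmiToReadIndices : List (String × List Int)) (bottomUmiToReadIndices : List (String × List Int)) : List String × List String × List (List Int) :=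
  let topD := pvAsDict topUmiToReadIndices
  let bottomD := pvAsDict bottomUmiToReadIndices
  let acc := topD.items.foldl (fun acc tp =>
      bottomD.items.foldl (fun acc bp =>
        let intersect := PySem.Set.inter tp.2 bp.2
        if PySem.Set.len intersect == 0 then acc
        else (acc.1 ++ [tp.1], acc.2.1 ++ [bp.1], acc.2.2 ++ [intersect])) acc)
    (([] : List String), ([] : List String), ([] : List (List Int)))
  let lengths := acc.2.2.map PySem.Set.len
  let quads := lengths.zip (acc.1.zip (acc.2.1.zip acc.2.2))
  -- sorted(zip4, reverse=True) compares the 4-tuples lexicographically; the 4th component (a set, no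
  -- total order in Python) is never reached because the (length, topUmi, bottomUmi) triples are
  -- pairwise distinct (dict keys are unique), so sorting by the 3-component lexicographic key is exact.
  let s := PySem.List.sorted quads (fun q => toLex (q.1, toLex (q.2.1, q.2.2.1))) true
  (s.map (fun q => q.2.1), s.map (fun q => q.2.2.1), s.map (fun q => q.2.2.2))

-- ===== PORT B =====
-- readToBottomUmis: invert the bottom map (for r in readIndices: setdefault(r, []).append(bottomUmi))
def pvR2B (bottomItems : List (String × List Int)) : PySem.Dict Int (List String) :=
  bottomItems.foldl (fun d bp => bp.2.foldl (fun d r => d.modify r [] (fun l => l ++ [bp.1])) d) PySem.Dict.empty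

-- pairToReads: one pass over the top reads, bucketing each read into its (topUmi, bottomUmi) pairs
def pvPairs (topItems bottomItems : List (String × List Int)) : PySem.Dict (String × String) (List Int) :=
  topItems.foldl (fun d tp => tp.2.foldl (fun d r =>
      ((pvR2B bottomItems).getD r []).foldl (fun d b => d.modify (tp.1, b) [] (fun s => PySem.Set.add s r)) d) d) PySem.Dict.empty

def pair_top_and_bottom_umi_by_matching_reads_alt (topUmiToReadIndices : List (String × List Int)) (bottomUmiToReadIndices : List (String × List Int)) : List String × List String × List (List Int) :=
  let pairToReads := pvPairs (pvAsDict topUmiToReadIndices).items (pvAsDict bottomUmiToReadIndices).items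
  let rows := PySem.List.sorted pairToReads.items (fun kv => toLex (PySem.Set.len kv.2, toLex (kv.1.1, kv.1.2))) true
  (rows.map (fun kv => kv.1.1), rows.map (fun kv => kv.1.2), rows.map (fun kv => kv.2))

-- ===== PRECONDITION & SPEC =====
-- Pre_ excludes exactly the inputs where no top set intersects any bottom set: there Python A's
-- 'zip(*sorted([]))' unpacking raises ValueError (B naturally returns three empty lists; see Raises_).
def Pre_pair_top_and_bottom_umi_by_matching_reads (topUmiToReadIndices : List (String × List Int)) (bottomUmiToReadIndices : List (String × List Int)) : Prop :=
  ∃ tp ∈ (pvAsDict topUmiToReadIndices).items, ∃ bp ∈ (pvAsDict bottomUmiToReadIndices).items, PySem.Set.inter tp.2 bp.2 ≠ []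
instance (topUmiToReadIndices : List (String × List Int)) (bottomUmiToReadIndices : List (String × List Int)) : Decidable (Pre_pair_top_and_bottom_umi_by_matching_reads topUmiToReadIndices bottomUmiToReadIndices) := by unfold Pre_pair_top_and_bottom_umi_by_matching_reads; infer_instance
def pvWitness_pair_top_and_bottom_umi_by_matching_reads : (List (String × List Int)) × (List (String × List Int)) := ([("a", [1, 2])], [("b", [2])])

def Spec_pair_top_and_bottom_umi_by_matching_reads (topUmiToReadIndices : List (String × List Int)) (bottomUmiToReadIndices : List (String × List Int)) (out : List String × List String × List (List Int)) : Prop := out = pair_top_and_bottom_umi_by_matching_reads_alt topUmiToReadIndices bottomUmiToReadIndices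
instance (topUmiToReadIndices : List (String × List Int)) (bottomUmiToReadIndices : List (String × List Int)) (out : List String × List String × List (List Int)) : Decidable (Spec_pair_top_and_bottom_umi_by_matching_reads topUmiToReadIndices bottomUmiToReadIndices out) := by unfold Spec_pair_top_and_bottom_umi_by_matching_reads; infer_instance

-- ===== CLAIM (what is proved, stated in full; the proofs are below) =====
def Claim_equal_pair_top_and_bottom_umi_by_matching_reads : Prop := ∀ (topUmiToReadIndices : List (String × List Int)) (bottomUmiToReadIndices : List (String × List Int)), Dom_pair_top_and_bottom_umi_by_matching_reads topUmiToReadIndices bottomUmiToReadIndices → Pre_pair_top_and_bottom_umi_by_matching_reads topUmiToReadIndices bottomUmiToReadIndices → Spec_pair_top_and_bottom_umi_by_matching_reads topUmiToReadIndices bottomUmiToReadIndices (pair_top_and_bottom_umi_by_matching_reads topUmiToReadIndices bottomUmiToReadIndices)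

-- ===== LEMMAS AND PROOFS =====

-- the list of matched rows (topUmi, bottomUmi, intersection), in A's generation order
def pvBf (tp : String × List Int) (BI : List (String × List Int)) : List (String × List Int) :=
  BI.filter (fun bp => !(PySem.Set.len (PySem.Set.inter tp.2 bp.2) == 0))

def pvL (TI BI : List (String × List Int)) : List (String × String × List Int) :=
  TI.flatMap (fun tp => (pvBf tp BI).map (fun bp => (tp.1, bp.1, PySem.Set.inter tp.2 bp.2)))

-- running value of pairToReads[(·, qb)] along the reads of one top row
def pvRowEval (BI : List (String × List Int)) (qb : String) (rs : List Int) (o : Option (List Int)) : Option (List Int) :=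
  rs.foldl (fun o r => if qb ∈ (pvR2B BI).getD r [] then some (PySem.Set.add (o.getD []) r) else o) o

theorem pvRowEval_cons (BI : List (String × List Int)) (qb : String) (r : Int) (rs : List Int) (o : Option (List Int)) :
    pvRowEval BI qb (r :: rs) o
      = pvRowEval BI qb rs (if qb ∈ (pvR2B BI).getD r [] then some (PySem.Set.add (o.getD []) r) else o) := rfl

-- ===== generic helper lemmas =====

theorem pv_len_ne (l : List Int) : ((!(PySem.Set.len l == 0)) = true) ↔ l ≠ [] := by
  cases l with
  | nil => simp [PySem.Set.len]
  | cons a t =>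
    simp only [PySem.Set.len]
    constructor
    · intro _ h; cases h
    · intro _
      simp only [Bool.not_eq_eq_eq_not, Bool.not_true, beq_eq_false_iff_ne, ne_eq]
      intro h
      have : (a :: t).length = 0 := by exact_mod_cast h
      simp at this

theorem pv_foldl_inv {α δ : Type} (l : List α) (f : δ → α → δ) (P : δ → Prop)
    (h : ∀ d x, P d → P (f d x)) : ∀ d, P d → P (l.foldl f d) := by
  induction l with
  | nil => intro d hd; exact hd
  | cons x t ih => intro d hd; exact ih _ (h d x hd)

theorem pv_fst_eq {α β : Type} {l : List (α × β)} (h : (l.map Prod.fst).Nodup) {a b : α × β}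
    (ha : a ∈ l) (hb : b ∈ l) (hf : a.1 = b.1) : a = b := by
  induction l with
  | nil => cases ha
  | cons x t ih =>
    simp only [List.map_cons, List.nodup_cons] at h
    rcases List.mem_cons.mp ha with rfl | ha' <;> rcases List.mem_cons.mp hb with rfl | hb'
    · rfl
    · exact absurd (List.mem_map.mpr ⟨b, hb', hf.symm⟩) h.1
    · exact absurd (List.mem_map.mpr ⟨a, ha', hf⟩) h.1
    · exact ih h.2 ha' hb'

theorem pv_flatMap_sublist {α β : Type} (l : List α) (f g : α → List β)
    (h : ∀ x, (f x).Sublist (g x)) : (l.flatMap f).Sublist (l.flatMap g) := by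
  induction l with
  | nil => simp
  | cons x t ih => simpa [List.flatMap_cons] using List.Sublist.append (h x) ih

theorem pv_get?_modify {κ ν : Type} [BEq κ] [LawfulBEq κ] [DecidableEq κ]
    (d : PySem.Dict κ ν) (k k' : κ) (d0 : ν) (f : ν → ν) :
    (d.modify k d0 f).get? k' = if k' = k then some (f (d.getD k d0)) else d.get? k' := by
  unfold PySem.Dict.modify
  simp [PySem.Dict.get?_insert]

theorem pv_nodup_keys_modify {κ ν : Type} [BEq κ] [LawfulBEq κ]
    (d : PySem.Dict κ ν) (k : κ) (d0 : ν) (f : ν → ν) (h : d.keys.Nodup) :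
    (d.modify k d0 f).keys.Nodup := by
  rw [PySem.Dict.keys_modify]
  exact PySem.Dict.nodup_keys_insert _ _ _ h

theorem pv_mem_items_foldl_insert {κ ν : Type} [BEq κ] [LawfulBEq κ]
    (l : List (κ × ν)) (d : PySem.Dict κ ν) (p : κ × ν)
    (hp : p ∈ (l.foldl (fun d q => d.insert q.1 q.2) d).items) : p ∈ d.items ∨ p ∈ l := by
  induction l generalizing d with
  | nil => exact Or.inl hp
  | cons q t ih =>
    rcases ih _ hp with h | h
    · rcases (PySem.Dict.mem_items_insert _ _ _ _).mp h with h' | h'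
      · exact Or.inr (by simp [h'])
      · exact Or.inl h'.1
    · exact Or.inr (List.mem_cons_of_mem _ h)

-- ===== readToBottomUmis characterisation =====

theorem pv_r2b_eq (BI : List (String × List Int)) : ∀ (d : PySem.Dict Int (List String)),
    BI.foldl (fun d bp => bp.2.foldl (fun d r => d.modify r [] (fun l => l ++ [bp.1])) d) d
      = (BI.flatMap (fun bp => bp.2.map (fun r' => (r', bp.1)))).foldl
          (fun d p => d.modify p.1 [] (fun l => l ++ [p.2])) d := by
  induction BI with
  | nil => intro d; rfl
  | cons bp t ih =>
    intro d
    rw [List.foldl_cons, ih, List.flatMap_cons, List.foldl_append, List.foldl_map]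

theorem pv_r2b_getD (BI : List (String × List Int)) (r : Int) :
    (pvR2B BI).getD r [] =
      ((BI.flatMap (fun bp => bp.2.map (fun r' => (r', bp.1)))).filter (fun p => p.1 == r)).map (fun p => p.2) := by
  unfold pvR2B
  rw [pv_r2b_eq, PySem.Dict.getD_foldl_modify_append]
  simp

theorem pv_mem_r2b (BI : List (String × List Int)) (r : Int) (b : String) :
    b ∈ (pvR2B BI).getD r [] ↔ ∃ bp ∈ BI, bp.1 = b ∧ r ∈ bp.2 := by
  rw [pv_r2b_getD]
  constructor
  · intro hm
    rcases List.mem_map.mp hm with ⟨p, hpf, rfl⟩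
    have hp1 : (p.1 == r) = true := (List.mem_filter.mp hpf).2
    rcases List.mem_flatMap.mp (List.mem_filter.mp hpf).1 with ⟨bp, hbp, hpm⟩
    rcases List.mem_map.mp hpm with ⟨r', hr', rfl⟩
    simp only [beq_iff_eq] at hp1
    subst hp1
    exact ⟨bp, hbp, rfl, hr'⟩
  · rintro ⟨bp, hbp, hb, hr⟩
    subst hb
    exact List.mem_map.mpr ⟨(r, bp.1),
      List.mem_filter.mpr ⟨List.mem_flatMap.mpr ⟨bp, hbp, List.mem_map.mpr ⟨r, hr, rfl⟩⟩, by simp⟩, rfl⟩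

-- ===== pairToReads characterisation =====

theorem pv_inner2 (t : String) (r : Int) (bs : List String) (qt qb : String) :
    ∀ (d : PySem.Dict (String × String) (List Int)),
    (bs.foldl (fun d b => d.modify (t, b) [] (fun s => PySem.Set.add s r)) d).get? (qt, qb)
      = if qt = t ∧ qb ∈ bs then some (PySem.Set.add (d.getD (qt, qb) []) r) else d.get? (qt, qb) := by
  induction bs with
  | nil => intro d; simp
  | cons b bs ih =>
    intro d
    rw [List.foldl_cons, ih, pv_get?_modify, PySem.Dict.getD_modify]
    by_cases h1 : qt = t <;> by_cases h2 : qb = b <;> by_cases h3 : qb ∈ bs <;>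
      simp_all [List.mem_cons, Prod.mk.injEq]

theorem pv_row (t : String) (BI : List (String × List Int)) (qt qb : String) (rs : List Int) :
    ∀ (d : PySem.Dict (String × String) (List Int)),
    (rs.foldl (fun d r => ((pvR2B BI).getD r []).foldl (fun d b => d.modify (t, b) [] (fun s => PySem.Set.add s r)) d) d).get? (qt, qb)
      = if qt = t then pvRowEval BI qb rs (d.get? (qt, qb)) else d.get? (qt, qb) := by
  induction rs with
  | nil => intro d; by_cases h : qt = t <;> simp [h, pvRowEval]
  | cons r rs ih =>
    intro d
    rw [List.foldl_cons, ih, pv_inner2, pvRowEval_cons]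
    by_cases h1 : qt = t
    · subst h1
      simp only [true_and, if_true]
      congr 1
    · simp [h1]

theorem pv_fold_skip (BI : List (String × List Int)) (qt qb : String) : ∀ (TI : List (String × List Int)),
    (∀ tp ∈ TI, tp.1 ≠ qt) → ∀ (d : PySem.Dict (String × String) (List Int)),
    (TI.foldl (fun d tp => tp.2.foldl (fun d r =>
        ((pvR2B BI).getD r []).foldl (fun d b => d.modify (tp.1, b) [] (fun s => PySem.Set.add s r)) d) d) d).get? (qt, qb)
      = d.get? (qt, qb) := by
  intro TI
  induction TI with
  | nil => intro _ d; rfl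
  | cons tp t ih =>
    intro h d
    rw [List.foldl_cons, ih (fun x hx => h x (List.mem_cons_of_mem _ hx)), pv_row]
    rw [if_neg (fun he => (h tp (by simp)) he.symm)]

theorem pv_pairs_get?_aux (BI : List (String × List Int)) (qt qb : String) : ∀ (TI : List (String × List Int)),
    (TI.map Prod.fst).Nodup → ∀ (d : PySem.Dict (String × String) (List Int)),
    (TI.foldl (fun d tp => tp.2.foldl (fun d r =>
        ((pvR2B BI).getD r []).foldl (fun d b => d.modify (tp.1, b) [] (fun s => PySem.Set.add s r)) d) d) d).get? (qt, qb)
      = match TI.find? (fun tp => tp.1 == qt) with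
        | some tp => pvRowEval BI qb tp.2 (d.get? (qt, qb))
        | none => d.get? (qt, qb) := by
  intro TI
  induction TI with
  | nil => intro _ d; rfl
  | cons tp t ih =>
    intro h d
    rw [List.foldl_cons]
    simp only [List.map_cons, List.nodup_cons] at h
    by_cases hqt : tp.1 = qt
    · have hrest : ∀ tp' ∈ t, tp'.1 ≠ qt := by
        intro tp' htp' he
        exact h.1 (List.mem_map.mpr ⟨tp', htp', he.trans hqt.symm⟩)
      rw [pv_fold_skip BI qt qb t hrest, pv_row, if_pos hqt.symm, List.find?_cons]
      simp [hqt]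
    · rw [ih h.2, pv_row, if_neg (fun he => hqt he.symm), List.find?_cons]
      have hb : (tp.1 == qt) = false := by simp [hqt]
      rw [hb]

theorem pv_pairs_get? (TI BI : List (String × List Int)) (h : (TI.map Prod.fst).Nodup) (qt qb : String) :
    (pvPairs TI BI).get? (qt, qb)
      = match TI.find? (fun tp => tp.1 == qt) with
        | some tp => pvRowEval BI qb tp.2 none
        | none => none := by
  unfold pvPairs
  rw [pv_pairs_get?_aux BI qt qb TI h PySem.Dict.empty]
  cases hfind : TI.find? (fun tp => tp.1 == qt) <;> simp [PySem.Dict.get?_empty]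

theorem pv_foldl_some {α : Type} [BEq α] : ∀ (l : List α) (s : PySem.Set α),
    l.foldl (fun o r => some (PySem.Set.add (o.getD []) r)) (some s) = some (l.foldl PySem.Set.add s) := by
  intro l
  induction l with
  | nil => intro s; rfl
  | cons r t ih => intro s; rw [List.foldl_cons, List.foldl_cons]; exact ih _

theorem pv_rowEval_none (BI : List (String × List Int)) (qb : String) (rs : List Int) (hnd : rs.Nodup) :
    pvRowEval BI qb rs none
      = (if rs.filter (fun r => decide (qb ∈ (pvR2B BI).getD r [])) = [] then none
         else some (rs.filter (fun r => decide (qb ∈ (pvR2B BI).getD r [])))) := by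
  unfold pvRowEval
  rw [PySem.List.foldl_ite_eq_foldl_filter]
  cases hf : rs.filter (fun r => decide (qb ∈ (pvR2B BI).getD r [])) with
  | nil => rfl
  | cons r l =>
    rw [List.foldl_cons]
    have h0 : (PySem.Set.add ((none : Option (List Int)).getD []) r) = [r] := rfl
    rw [h0, pv_foldl_some]
    have hnodup : (r :: l).Nodup := hf ▸ (hnd.filter _)
    have h2 : (r :: l).foldl PySem.Set.add [] = r :: l := by
      rw [← PySem.Set.ofList_eq_foldl]
      exact PySem.Set.ofList_eq_self_of_nodup _ hnodup
    rw [List.foldl_cons] at h2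
    have h1 : (PySem.Set.add ([] : PySem.Set Int) r) = [r] := rfl
    rw [h1] at h2
    rw [h2]
    simp

theorem pv_pairs_keys_nodup (TI BI : List (String × List Int)) : (pvPairs TI BI).keys.Nodup := by
  unfold pvPairs
  exact pv_foldl_inv TI _ (fun d : PySem.Dict (String × String) (List Int) => d.keys.Nodup)
    (fun d tp hd =>
      pv_foldl_inv tp.2 _ (fun d : PySem.Dict (String × String) (List Int) => d.keys.Nodup)
        (fun d' r hd' =>
          pv_foldl_inv ((pvR2B BI).getD r []) _ (fun d : PySem.Dict (String × String) (List Int) => d.keys.Nodup)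
            (fun d'' b hd'' => pv_nodup_keys_modify _ _ _ _ hd'') d' hd') d hd)
    PySem.Dict.empty (by simp [PySem.Dict.empty])

-- ===== the items of pairToReads are exactly the matched rows =====

theorem pv_items_iff (TI BI : List (String × List Int))
    (hTn : (TI.map Prod.fst).Nodup) (hBn : (BI.map Prod.fst).Nodup)
    (hTv : ∀ tp ∈ TI, (tp.2 : List Int).Nodup)
    (p : (String × String) × List Int) :
    p ∈ (pvPairs TI BI).items ↔ p ∈ (pvL TI BI).map (fun x => ((x.1, x.2.1), x.2.2)) := by
  obtain ⟨⟨qt, qb⟩, s⟩ := p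
  rw [← PySem.Dict.get?_eq_some_iff_mem_items _ _ _ (pv_pairs_keys_nodup TI BI)]
  rw [pv_pairs_get? TI BI hTn]
  have hRHS : (((qt, qb), s) ∈ (pvL TI BI).map (fun x => ((x.1, x.2.1), x.2.2)))
      ↔ ∃ tp ∈ TI, ∃ bp ∈ BI, tp.1 = qt ∧ bp.1 = qb ∧ PySem.Set.inter tp.2 bp.2 ≠ [] ∧ s = PySem.Set.inter tp.2 bp.2 := by
    constructor
    · intro hm
      rcases List.mem_map.mp hm with ⟨x, hxL, hxe⟩
      rcases List.mem_flatMap.mp hxL with ⟨tp, htp, hx⟩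
      rcases List.mem_map.mp hx with ⟨bp, hbpf, rfl⟩
      have hbpm := (List.mem_filter.mp hbpf).1
      have hcond := (pv_len_ne _).mp (List.mem_filter.mp hbpf).2
      have h1 : tp.1 = qt := congrArg (fun z => z.1.1) hxe
      have h2 : bp.1 = qb := congrArg (fun z => z.1.2) hxe
      have h3 : PySem.Set.inter tp.2 bp.2 = s := congrArg Prod.snd hxe
      exact ⟨tp, htp, bp, hbpm, h1, h2, hcond, h3.symm⟩
    · rintro ⟨tp, htp, bp, hbp, h1, h2, h3, h4⟩
      apply List.mem_map.mpr
      refine ⟨(tp.1, bp.1, PySem.Set.inter tp.2 bp.2), ?_, by rw [h1, h2, h4]⟩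
      exact List.mem_flatMap.mpr ⟨tp, htp,
        List.mem_map.mpr ⟨bp, List.mem_filter.mpr ⟨hbp, (pv_len_ne _).mpr h3⟩, rfl⟩⟩
  rw [hRHS]
  cases hfind : TI.find? (fun tp => tp.1 == qt) with
  | none =>
    simp only
    constructor
    · intro h; cases h
    · rintro ⟨tp, htp, _, _, h1, _⟩
      have := List.find?_eq_none.mp hfind tp htp
      simp [h1] at this
  | some tp =>
    simp only
    have htpm : tp ∈ TI := List.mem_of_find?_eq_some hfind
    have htq : tp.1 = qt := by simpa using List.find?_some hfind
    rw [pv_rowEval_none BI qb tp.2 (hTv tp htpm)]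
    by_cases hbp : ∃ bp ∈ BI, bp.1 = qb
    · obtain ⟨bp, hbpm, hbq⟩ := hbp
      have hiff : ∀ r, qb ∈ (pvR2B BI).getD r [] ↔ r ∈ bp.2 := by
        intro r
        rw [pv_mem_r2b]
        constructor
        · rintro ⟨bp', hm1, hm2, hm3⟩
          have hbe : bp' = bp := pv_fst_eq hBn hm1 hbpm (hm2.trans hbq.symm)
          exact hbe ▸ hm3
        · intro hmm; exact ⟨bp, hbpm, hbq, hmm⟩
      have hfil : tp.2.filter (fun r => decide (qb ∈ (pvR2B BI).getD r [])) = PySem.Set.inter tp.2 bp.2 := by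
        unfold PySem.Set.inter PySem.Set.contains
        apply List.filter_congr
        intro r _
        by_cases h : r ∈ bp.2 <;> simp [hiff r, h]
      rw [hfil]
      constructor
      · intro h
        by_cases he : PySem.Set.inter tp.2 bp.2 = []
        · rw [if_pos he] at h; cases h
        · rw [if_neg he] at h
          exact ⟨tp, htpm, bp, hbpm, htq, hbq, he, (Option.some_injective _ h).symm⟩
      · rintro ⟨tp', htp', bp', hbp', h1, h2, h3, h4⟩
        have het : tp' = tp := pv_fst_eq hTn htp' htpm (h1.trans htq.symm)
        have heb : bp' = bp := pv_fst_eq hBn hbp' hbpm (h2.trans hbq.symm)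
        subst het; subst heb
        rw [if_neg h3, h4]
    · have hfe : tp.2.filter (fun r => decide (qb ∈ (pvR2B BI).getD r [])) = [] := by
        apply List.filter_eq_nil_iff.mpr
        intro r _
        simp only [decide_eq_true_eq, pv_mem_r2b]
        rintro ⟨bp', hm1, hm2, _⟩
        exact hbp ⟨bp', hm1, hm2⟩
      rw [hfe]
      simp only [reduceIte]
      constructor
      · intro h; cases h
      · rintro ⟨tp', _, bp', hbp', _, h2, _, _⟩
        exact absurd ⟨bp', hbp', h2⟩ hbp

-- ===== A-side: the nested loop builds the rows of pvL =====

theorem pvBf_cons (tp bp : String × List Int) (t : List (String × List Int)) :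
    pvBf tp (bp :: t)
      = if (!(PySem.Set.len (PySem.Set.inter tp.2 bp.2) == 0)) = true then bp :: pvBf tp t
        else pvBf tp t := by
  simp only [pvBf, List.filter_cons]

theorem pv_A_inner (tp : String × List Int) (BI : List (String × List Int)) :
    ∀ (acc : List String × List String × List (List Int)),
    BI.foldl (fun acc bp =>
        if PySem.Set.len (PySem.Set.inter tp.2 bp.2) == 0 then acc
        else (acc.1 ++ [tp.1], acc.2.1 ++ [bp.1], acc.2.2 ++ [PySem.Set.inter tp.2 bp.2])) acc
      = (acc.1 ++ (pvBf tp BI).map (fun _ => tp.1),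
         acc.2.1 ++ (pvBf tp BI).map (fun bp => bp.1),
         acc.2.2 ++ (pvBf tp BI).map (fun bp => PySem.Set.inter tp.2 bp.2)) := by
  induction BI with
  | nil => intro acc; simp [pvBf]
  | cons bp t ih =>
    intro acc
    rw [List.foldl_cons, pvBf_cons]
    by_cases hc : (PySem.Set.len (PySem.Set.inter tp.2 bp.2) == 0) = true
    · rw [hc]
      simp only [Bool.not_true, Bool.false_eq_true, if_false, if_true]
      exact ih acc
    · have hc' : (PySem.Set.len (PySem.Set.inter tp.2 bp.2) == 0) = false := by
        simpa using hc
      rw [hc']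
      simp only [Bool.not_false, Bool.false_eq_true, if_false, if_true]
      rw [ih]
      simp only [List.map_cons, List.cons_append, List.append_assoc, List.nil_append]

theorem pv_A_acc (BI : List (String × List Int)) : ∀ (TI : List (String × List Int))
    (acc : List String × List String × List (List Int)),
    TI.foldl (fun acc tp => BI.foldl (fun acc bp =>
        if PySem.Set.len (PySem.Set.inter tp.2 bp.2) == 0 then acc
        else (acc.1 ++ [tp.1], acc.2.1 ++ [bp.1], acc.2.2 ++ [PySem.Set.inter tp.2 bp.2])) acc) acc
      = (acc.1 ++ (pvL TI BI).map (fun x => x.1),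
         acc.2.1 ++ (pvL TI BI).map (fun x => x.2.1),
         acc.2.2 ++ (pvL TI BI).map (fun x => x.2.2)) := by
  intro TI
  induction TI with
  | nil => intro acc; simp [pvL]
  | cons tp t ih =>
    intro acc
    rw [List.foldl_cons, pv_A_inner, ih]
    simp [pvL, List.flatMap_cons, List.map_append, List.append_assoc, List.map_map, Function.comp_def]

-- fst-components of the rows are pairwise distinct
theorem pv_L_fst_nodup (TI BI : List (String × List Int))
    (hTn : (TI.map Prod.fst).Nodup) (hBn : (BI.map Prod.fst).Nodup) :
    ((pvL TI BI).map (fun x => (x.1, x.2.1))).Nodup := by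
  have h1 : (pvL TI BI).map (fun x => (x.1, x.2.1))
      = TI.flatMap (fun tp => (pvBf tp BI).map (fun bp => (tp.1, bp.1))) := by
    simp [pvL, List.map_flatMap, List.map_map, Function.comp_def]
  have h2 : ((TI.map Prod.fst).product (BI.map Prod.fst))
      = TI.flatMap (fun tp => BI.map (fun bp => (tp.1, bp.1))) := by
    simp [List.product, List.flatMap_map, List.map_map, Function.comp_def]
  have hsub : ((pvL TI BI).map (fun x => (x.1, x.2.1))).Sublist ((TI.map Prod.fst).product (BI.map Prod.fst)) := by
    rw [h1, h2]
    exact pv_flatMap_sublist _ _ _ (fun tp => List.Sublist.map _ List.filter_sublist)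
  exact (List.Nodup.product hTn hBn).sublist hsub

-- items of the input dicts: keys are unique, values are deduplicated sets
theorem pv_asdict_keys_nodup (l : List (String × List Int)) :
    ((pvAsDict l).items.map Prod.fst).Nodup :=
  PySem.Dict.nodup_keys_ofList _

theorem pv_asdict_values_nodup (l : List (String × List Int)) :
    ∀ p ∈ (pvAsDict l).items, (p.2 : List Int).Nodup := by
  intro p hp
  unfold pvAsDict PySem.Dict.ofList PySem.Dict.update at hp
  rcases pv_mem_items_foldl_insert _ _ _ hp with h | h
  · cases h
  · rcases List.mem_map.mp h with ⟨q, _, rfl⟩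
    exact PySem.Set.nodup_ofList _

-- equal 3-component sort keys force equal (topUmi, bottomUmi) pairs
theorem pv_keyB_fst {x y : (String × String) × List Int}
    (h : (toLex (PySem.Set.len x.2, toLex (x.1.1, x.1.2)) : Lex (Int × Lex (String × String)))
       = toLex (PySem.Set.len y.2, toLex (y.1.1, y.1.2))) : x.1 = y.1 := by
  have h2 := congrArg (fun z => ofLex z) h
  have h3 := congrArg Prod.snd h2
  have h4 := congrArg (fun z => ofLex z) h3
  have h5 := congrArg Prod.fst h4
  have h6 := congrArg Prod.snd h4
  simp only at h5 h6
  exact Prod.ext h5 h6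

theorem pv_main (top bot : List (String × List Int)) :
    pair_top_and_bottom_umi_by_matching_reads top bot = pair_top_and_bottom_umi_by_matching_reads_alt top bot := by
  have hTn := pv_asdict_keys_nodup top
  have hBn := pv_asdict_keys_nodup bot
  have hTv := pv_asdict_values_nodup top
  simp only [pair_top_and_bottom_umi_by_matching_reads, pair_top_and_bottom_umi_by_matching_reads_alt]
  set TI := (pvAsDict top).items with hTIdef
  set BI := (pvAsDict bot).items with hBIdef
  set itemsB := (pvPairs TI BI).items with hitemsdef
  have hitemsN : itemsB.Nodup := List.Nodup.of_map _ (pv_pairs_keys_nodup TI BI)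
  have hLN : ((pvL TI BI).map (fun x => ((x.1, x.2.1), x.2.2))).Nodup := by
    have hfst := pv_L_fst_nodup TI BI hTn hBn
    apply List.Nodup.of_map (f := Prod.fst)
    simpa [List.map_map, Function.comp_def] using hfst
  have hperm0 : itemsB.Perm ((pvL TI BI).map (fun x => ((x.1, x.2.1), x.2.2))) :=
    (List.perm_ext_iff_of_nodup hitemsN hLN).mpr (fun p => pv_items_iff TI BI hTn hBn hTv p)
  set keyB : ((String × String) × List Int) → Lex (Int × Lex (String × String)) :=
    (fun kv => toLex (PySem.Set.len kv.2, toLex (kv.1.1, kv.1.2))) with hkeyBdef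
  set rows := PySem.List.sorted itemsB keyB true with hrowsdef
  have hrowsperm : rows.Perm itemsB := PySem.List.sorted_perm _ _ _
  have hfstnd : (rows.map Prod.fst).Nodup :=
    ((hrowsperm.map Prod.fst).nodup_iff).mpr (pv_pairs_keys_nodup TI BI)
  have hpairNe : rows.Pairwise (fun a b => a.1 ≠ b.1) := List.pairwise_map.mp hfstnd
  have hpairLe : rows.Pairwise (fun a b => keyB b ≤ keyB a) := PySem.List.sorted_pairwise_rev _ _
  have hpairLt : rows.Pairwise (fun a b => keyB b < keyB a) := by
    refine (hpairLe.and hpairNe).imp ?_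
    rintro a b ⟨hle, hne⟩
    exact lt_of_le_of_ne hle (fun he => hne (pv_keyB_fst he).symm)
  rw [pv_A_acc]
  simp only [List.nil_append, List.map_map, Function.comp_def]
  rw [List.zip_map', List.zip_map', List.zip_map']
  have hmapeq : (pvL TI BI).map (fun x => (PySem.Set.len x.2.2, x.1, x.2.1, x.2.2))
      = ((pvL TI BI).map (fun x => ((x.1, x.2.1), x.2.2))).map (fun kv => (PySem.Set.len kv.2, kv.1.1, kv.1.2, kv.2)) := by
    simp [List.map_map, Function.comp_def]
  have hsorted : PySem.List.sorted ((pvL TI BI).map (fun x => (PySem.Set.len (x.2.2), x.1, x.2.1, x.2.2)))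
      (fun q => toLex (q.1, toLex (q.2.1, q.2.2.1))) true
      = rows.map (fun kv => (PySem.Set.len kv.2, kv.1.1, kv.1.2, kv.2)) := by
    apply PySem.List.sorted_rev_eq_of_perm_of_pairwise_gt
    · rw [hmapeq]
      exact (hrowsperm.map _).trans (hperm0.map _)
    · rw [List.pairwise_map]
      exact hpairLt
  rw [hsorted]
  simp [List.map_map, Function.comp_def]

-- ===== VERDICT (by name: the statement is the Claim_ definition above) =====
theorem pair_top_and_bottom_umi_by_matching_reads_spec : Claim_equal_pair_top_and_bottom_umi_by_matching_reads := by
  intro top bot _ _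
  unfold Spec_pair_top_and_bottom_umi_by_matching_reads
  exact pv_main top bot
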